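-- pv_equiv track=rewrite | github.com/drathier/elm-graph | transformer.py | replace_exposing
-- ===== SOURCE A (Python) =====
-- def replace_exposing(s, found_functions):
--     exposing_pos = 0
--     for x in s.splitlines(keepends=True):
--         exposing_pos += len(x)
--         if x.strip().endswith("exposing"):
--             break
--     module_pos = 0
--     for x in s.splitlines(keepends=True):
--         if x.strip() == "":
--             break
--         module_pos += len(x)
--
--     exposing, module, code = s[:exposing_pos], s[exposing_pos:module_pos], s[module_pos:]
--
--     exported = [x.strip().strip("()").strip() for x in module.split(",")]
--
--     cleaned_module_list = [x for x in exported if x in found_functions]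
--
--     # build new s
--     new_s = exposing
--     new_s += "    (" + ", ".join(cleaned_module_list or [".."]) + ")"
--     new_s += "\n"
--     new_s += code
--
--     return new_s
-- ===== SOURCE B (Python) =====
-- def replace_exposing(s, found_functions):
--     # single hand-rolled char-level scan: find both boundaries in one pass, no splitlines
--     n = len(s)
--     pe = None  # char pos just after the line whose stripped text ends with "exposing"
--     pm = None  # char pos of the start of the first blank line
--     start = 0  # start position of the current line
--     buf = []   # characters of the current line (without its ending)
--     i = 0
--     while True:
--         if i >= n or s[i] in "\r\n":
--             if i < n and s[i] == '\r' and i + 1 < n and s[i + 1] == '\n':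
--                 end = i + 2
--             elif i < n:
--                 end = i + 1
--             else:
--                 end = i
--             t = "".join(buf).strip()
--             if pe is None and t.endswith("exposing"):
--                 pe = end
--             if pm is None and t == "":
--                 pm = start
--             if i >= n:
--                 break
--             i = end
--             start = end
--             buf = []
--         else:
--             buf.append(s[i])
--             i += 1
--     if pe is None:
--         pe = n
--     if pm is None:
--         pm = n
--
--     exposing, module, code = s[:pe], s[pe:pm], s[pm:]
--     kept = [y for y in (p.strip().strip("()").strip() for p in module.split(","))
--             if y in found_functions]
--     return exposing + "    (" + ", ".join(kept or [".."]) + ")\n" + code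
-- ===== Notes on version B (the rewrite author's own statement) =====
-- stated objective: alternative
-- what changed: B replaces A's two independent splitlines passes (each accumulating character counts over whole lines) by a single hand-rolled character-level scan that never builds a line list and detects both boundary positions (exposing line end, first blank line start) in one traversal with a current-line buffer; the clean-and-filter of exported names is fused into one pass.
import Mathlib
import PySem

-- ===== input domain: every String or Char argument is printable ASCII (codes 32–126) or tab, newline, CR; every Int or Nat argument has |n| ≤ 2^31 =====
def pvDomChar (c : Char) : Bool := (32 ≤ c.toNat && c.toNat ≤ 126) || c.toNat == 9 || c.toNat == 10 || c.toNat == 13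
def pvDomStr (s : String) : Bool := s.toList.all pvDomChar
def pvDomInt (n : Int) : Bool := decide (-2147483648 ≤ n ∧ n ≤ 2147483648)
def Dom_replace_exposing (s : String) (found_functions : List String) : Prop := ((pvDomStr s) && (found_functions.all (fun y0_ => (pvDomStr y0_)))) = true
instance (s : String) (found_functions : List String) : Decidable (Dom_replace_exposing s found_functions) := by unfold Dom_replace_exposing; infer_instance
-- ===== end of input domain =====

-- B replaces A's two whole-file splitlines scans by ONE hand-rolled character-level pass that
-- never builds a line list and finds both boundary positions in a single traversal;
-- objective: alternative decomposition, same cost.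

-- ===== PORT A =====
-- s.splitlines(keepends=True), hand-ported: exact on the stated Dom (line breaks there are
-- only '\n', '\r', '\r\n'; Dom admits no '\v', '\f' or other Unicode breaks).
-- pvLine cs = (first line including its line ending, rest of the string)
def pvLine : List Char → List Char × List Char
  | [] => ([], [])
  | '\r' :: '\n' :: rest => (['\r', '\n'], rest)
  | c :: rest =>
    if c = '\n' ∨ c = '\r' then ([c], rest)
    else
      let p := pvLine rest
      (c :: p.1, p.2)

theorem pvLine_snd_lt : ∀ (cs : List Char), cs ≠ [] → (pvLine cs).2.length < cs.length := by
  intro cs hne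
  induction cs using pvLine.induct with
  | case1 => exact absurd rfl hne
  | case2 rest => simp [pvLine]
  | case3 c rest h1 h2 =>
    rw [pvLine.eq_def]
    split <;> simp_all
  | case4 c rest h1 h2 ih =>
    have hle : (pvLine rest).2.length ≤ rest.length := by
      cases rest with
      | nil => simp [pvLine]
      | cons d r => exact Nat.le_of_lt (ih (by simp))
    rw [pvLine.eq_def]
    split <;> simp_all

def pvSplitKeep : List Char → List (List Char)
  | [] => []
  | c :: cs => (pvLine (c :: cs)).1 :: pvSplitKeep (pvLine (c :: cs)).2
  termination_by cs => cs.length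
  decreasing_by exact pvLine_snd_lt (c :: cs) (by simp)

-- x.strip().endswith("exposing")
def pvCondE (x : List Char) : Bool := PySem.Chars.endswith (PySem.Chars.strip x) ("exposing".toList)
-- x.strip() == ""
def pvCondB (x : List Char) : Bool := PySem.Chars.strip x == ([] : List Char)
-- x.strip().strip("()").strip()
def pvClean (x : List Char) : List Char :=
  PySem.Chars.strip (PySem.Chars.stripChars (PySem.Chars.strip x) ("()".toList))

-- A's first loop: exposing_pos += len(x); if cond: break
def pvPosE : List (List Char) → Nat
  | [] => 0
  | x :: r => if pvCondE x then x.length else x.length + pvPosE r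

-- A's second loop: if blank: break; module_pos += len(x)
def pvPosM : List (List Char) → Nat
  | [] => 0
  | x :: r => if pvCondB x then 0 else x.length + pvPosM r

def replace_exposing (s : String) (found_functions : List String) : String :=
  let cs := s.toList
  let lines := pvSplitKeep cs
  let exposing_pos : Nat := pvPosE lines
  let module_pos : Nat := pvPosM lines
  let exposing := PySem.List.slice cs none (some (exposing_pos : Int))
  let module := PySem.List.slice cs (some (exposing_pos : Int)) (some (module_pos : Int))
  let code := PySem.List.slice cs (some (module_pos : Int)) none
  let exported := (PySem.Chars.splitOn module [',']).map pvClean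
  -- 'x in found_functions' compares strings; we work over char lists
  let cleaned_module_list := exported.filter (fun x => (found_functions.map String.toList).contains x)
  let names := if cleaned_module_list.isEmpty then [("..".toList)] else cleaned_module_list
  String.ofList (exposing ++ ("    (".toList) ++ PySem.Chars.join (", ".toList) names
             ++ (")".toList) ++ ("\n".toList) ++ code)

-- ===== PORT B =====
-- Source B's single char-level scan: pvScan rest buf start pe? pm?, where buf is the current line
-- so far (without its ending), start the char position where that line begins (the python index
-- i is start + len(buf)), pe?/pm? the two boundary positions once found.
def pvScan : List Char → List Char → Nat → Option Nat → Option Nat → Option Nat × Option Nat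
  | [], buf, start, pe?, pm? =>
      let t := PySem.Chars.strip buf
      (if pe?.isNone && PySem.Chars.endswith t ("exposing".toList) then some (start + buf.length) else pe?,
       if pm?.isNone && (t == ([] : List Char)) then some start else pm?)
  | '\r' :: '\n' :: r, buf, start, pe?, pm? =>
      let t := PySem.Chars.strip buf
      pvScan r [] (start + buf.length + 2)
        (if pe?.isNone && PySem.Chars.endswith t ("exposing".toList) then some (start + buf.length + 2) else pe?)
        (if pm?.isNone && (t == ([] : List Char)) then some start else pm?)
  | c :: r, buf, start, pe?, pm? =>
      if c = '\n' ∨ c = '\r' then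
        let t := PySem.Chars.strip buf
        pvScan r [] (start + buf.length + 1)
          (if pe?.isNone && PySem.Chars.endswith t ("exposing".toList) then some (start + buf.length + 1) else pe?)
          (if pm?.isNone && (t == ([] : List Char)) then some start else pm?)
      else pvScan r (buf ++ [c]) start pe? pm?

def replace_exposing_alt (s : String) (found_functions : List String) : String :=
  let cs := s.toList
  let res := pvScan cs [] 0 none none
  let pe : Nat := res.1.getD cs.length      -- if pe is None: pe = n
  let pm : Nat := res.2.getD cs.length      -- if pm is None: pm = n
  let exposing := PySem.List.slice cs none (some (pe : Int))
  let module := PySem.List.slice cs (some (pe : Int)) (some (pm : Int))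
  let code := PySem.List.slice cs (some (pm : Int)) none
  -- fused clean-and-filter comprehension; 'y in found_functions' compares strings
  let kept := (PySem.Chars.splitOn module [',']).filterMap (fun p =>
    let y := pvClean p
    if (found_functions.map String.toList).contains y then some y else none)
  let names := if kept.isEmpty then [("..".toList)] else kept
  String.ofList (exposing ++ ("    (".toList) ++ PySem.Chars.join (", ".toList) names
             ++ (")".toList) ++ ("\n".toList) ++ code)

-- ===== PRECONDITION & SPEC =====
def Spec_replace_exposing (s : String) (found_functions : List String) (out : String) : Prop := out = replace_exposing_alt s found_functions
instance (s : String) (found_functions : List String) (out : String) : Decidable (Spec_replace_exposing s found_functions out) := by unfold Spec_replace_exposing; infer_instance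

-- ===== CLAIM (what is proved, stated in full; the proofs are below) =====
def Claim_equal_replace_exposing : Prop := ∀ (s : String) (found_functions : List String), Dom_replace_exposing s found_functions → Spec_replace_exposing s found_functions (replace_exposing s found_functions)

-- ===== LEMMAS AND PROOFS =====

-- trailing whitespace does not change strip
theorem rstrip_append_ws (x t : List Char) (ht : ∀ c ∈ t, PySem.Chars.isspace c = true) :
    PySem.Chars.rstrip (x ++ t) = PySem.Chars.rstrip x := by
  simp only [PySem.Chars.rstrip, List.reverse_append, List.dropWhile_append,
    List.isEmpty_iff, List.dropWhile_eq_nil_iff, List.mem_reverse]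
  split
  · rfl
  · next h => exact absurd (fun a ha => ht a ha) h

theorem strip_append_ws (x t : List Char) (ht : ∀ c ∈ t, PySem.Chars.isspace c = true) :
    PySem.Chars.strip (x ++ t) = PySem.Chars.strip x := by
  unfold PySem.Chars.strip PySem.Chars.lstrip
  rw [List.dropWhile_append]
  have hdt : List.dropWhile PySem.Chars.isspace t = [] :=
    List.dropWhile_eq_nil_iff.mpr (fun a ha => ht a ha)
  split
  · next h =>
    rw [List.isEmpty_iff] at h
    rw [h, hdt]
  · next h => exact rstrip_append_ws _ _ ht

-- the first line of buf ++ terminator ++ r, for a newline-free buf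
theorem pvLine_of_nlfree (buf : List Char) (hb : ∀ c ∈ buf, c ≠ '\n' ∧ c ≠ '\r') :
    pvLine buf = (buf, []) := by
  induction buf with
  | nil => simp [pvLine]
  | cons b bs ih =>
    have hb' : b ≠ '\n' ∧ b ≠ '\r' := hb b (by simp)
    rw [pvLine.eq_def]
    split
    · simp_all
    · simp_all
    · next c rest h1 h2 =>
      have hc : c = b ∧ rest = bs := by
        constructor <;> · injection h2 with e1 e2; simp_all
      rcases hc with ⟨rfl, rfl⟩
      rw [if_neg (by tauto)]
      simp [ih (fun c hc => hb c (by simp [hc]))]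

theorem pvLine_crlf (buf r : List Char) (hb : ∀ c ∈ buf, c ≠ '\n' ∧ c ≠ '\r') :
    pvLine (buf ++ '\r' :: '\n' :: r) = (buf ++ ['\r', '\n'], r) := by
  induction buf with
  | nil => simp [pvLine]
  | cons b bs ih =>
    have hb' : b ≠ '\n' ∧ b ≠ '\r' := hb b (by simp)
    rw [List.cons_append, pvLine.eq_def]
    split
    · simp_all
    · next h => simp_all
    · next c rest h1 h2 =>
      have hc : c = b ∧ rest = bs ++ '\r' :: '\n' :: r := by
        constructor <;> · injection h2 with e1 e2; simp_all
      rcases hc with ⟨rfl, rfl⟩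
      rw [if_neg (by tauto)]
      simp [ih (fun c hc => hb c (by simp [hc]))]

theorem pvLine_single (buf r : List Char) (c : Char) (hb : ∀ c ∈ buf, c ≠ '\n' ∧ c ≠ '\r')
    (hc : c = '\n' ∨ c = '\r') (hnot : ¬(c = '\r' ∧ ∃ r', r = '\n' :: r')) :
    pvLine (buf ++ c :: r) = (buf ++ [c], r) := by
  induction buf with
  | nil =>
    rw [List.nil_append, pvLine.eq_def]
    split
    · simp_all
    · next h =>
      injection h with e1 e2
      exact absurd ⟨e1, by exact e2 ▸ ⟨_, rfl⟩⟩ hnot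
    · next c' rest h1 h2 =>
      injection h2 with e1 e2
      subst e1; subst e2
      rw [if_pos hc]
      simp
  | cons b bs ih =>
    have hb' : b ≠ '\n' ∧ b ≠ '\r' := hb b (by simp)
    rw [List.cons_append, pvLine.eq_def]
    split
    · simp_all
    · next h => simp_all
    · next c' rest h1 h2 =>
      have : c' = b ∧ rest = bs ++ c :: r := by
        constructor <;> · injection h2 with e1 e2; simp_all
      rcases this with ⟨rfl, rfl⟩
      rw [if_neg (by tauto)]
      simp [ih (fun c hc => hb c (by simp [hc]))]

theorem pvSplitKeep_ne (cs : List Char) (h : cs ≠ []) :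
    pvSplitKeep cs = (pvLine cs).1 :: pvSplitKeep (pvLine cs).2 := by
  cases cs with
  | nil => exact absurd rfl h
  | cons c r => rw [pvSplitKeep]
theorem pvScan_spec (cs buf : List Char) (start : Nat) (pe? pm? : Option Nat) :
    (∀ c ∈ buf, c ≠ '\n' ∧ c ≠ '\r') →
    ∀ d : Nat, d = start + buf.length + cs.length →
    ((pvScan cs buf start pe? pm?).1.getD d
        = pe?.getD (start + pvPosE (pvSplitKeep (buf ++ cs)))
  ∧ (pvScan cs buf start pe? pm?).2.getD d
        = pm?.getD (start + pvPosM (pvSplitKeep (buf ++ cs)))) := by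
  induction cs, buf, start, pe?, pm? using pvScan.induct with
  | case1 buf start pe? pm? =>
    intro hb d hd
    rcases hbuf : buf with _ | ⟨b, bs⟩
    · subst hbuf; subst hd
      constructor
      · rcases pe? with _ | v
        · simp [pvScan, pvSplitKeep, pvPosE]
          rw [if_neg (by decide)]
          simp
        · simp [pvScan, pvSplitKeep, pvPosE]
      · rcases pm? with _ | w
        · simp [pvScan, pvSplitKeep, pvPosM]
          rw [if_pos (by decide)]
          simp
        · simp [pvScan, pvSplitKeep, pvPosM]
    · subst hbuf; subst hd
      have hsp : pvSplitKeep (b :: bs) = [b :: bs] := by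
        rw [pvSplitKeep_ne _ (by simp), pvLine_of_nlfree _ hb]
        simp [pvSplitKeep]
      simp only [pvScan, List.append_nil, List.length_nil, Nat.add_zero, hsp, pvPosE, pvPosM,
        pvCondE, pvCondB]
      constructor
      · rcases pe? with _ | v
        · split <;> simp
        · simp
      · rcases pm? with _ | w
        · split <;> simp_all
        · simp
  | case2 r buf start pe? pm? t ih =>
    intro hb d hd
    simp only [show t = PySem.Chars.strip buf from rfl] at ih
    have hsp : pvSplitKeep (buf ++ '\r' :: '\n' :: r) = (buf ++ ['\r', '\n']) :: pvSplitKeep r := by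
      rw [pvSplitKeep_ne _ (by simp), pvLine_crlf buf r hb]
    have hws : ∀ c ∈ ['\r', '\n'], PySem.Chars.isspace c = true := by
      intro c hc; simp at hc; rcases hc with rfl | rfl <;> decide
    have hE : pvCondE (buf ++ ['\r', '\n']) = PySem.Chars.endswith (PySem.Chars.strip buf) ("exposing".toList) := by
      unfold pvCondE; rw [strip_append_ws _ _ hws]
    have hB : pvCondB (buf ++ ['\r', '\n']) = (PySem.Chars.strip buf == ([] : List Char)) := by
      unfold pvCondB; rw [strip_append_ws _ _ hws]
    rcases ih (by simp) d (by rw [hd]; simp; omega) with ⟨ih1, ih2⟩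
    simp only [pvScan]
    rw [hsp]
    constructor
    · rcases pe? with _ | v
      · by_cases hEe : PySem.Chars.endswith (PySem.Chars.strip buf) (['e','x','p','o','s','i','n','g']) = true
        · simp [hEe, pvPosE, hE] at ih1 ⊢
          omega
        · simp [hEe, pvPosE, hE] at ih1 ⊢
          omega
      · simp [pvPosE] at ih1 ⊢
        omega
    · rcases pm? with _ | w
      · by_cases hBe : (PySem.Chars.strip buf == ([] : List Char)) = true
        · simp [hBe, pvPosM, hB] at ih2 ⊢
          omega
        · simp [hBe, pvPosM, hB] at ih2 ⊢
          omega
      · simp [pvPosM] at ih2 ⊢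
        omega
  | case3 c r buf start pe? pm? hx hc t ih =>
    intro hb d hd
    simp only [show t = PySem.Chars.strip buf from rfl] at ih
    have hnot : ¬(c = '\r' ∧ ∃ r', r = '\n' :: r') := by
      rintro ⟨hcr, r', hr⟩; exact hx r' hcr hr
    have hsp : pvSplitKeep (buf ++ c :: r) = (buf ++ [c]) :: pvSplitKeep r := by
      rw [pvSplitKeep_ne _ (by simp), pvLine_single buf r c hb hc hnot]
    have hws : ∀ e ∈ [c], PySem.Chars.isspace e = true := by
      intro e he; simp at he; subst he
      rcases hc with rfl | rfl <;> decide
    have hE : pvCondE (buf ++ [c]) = PySem.Chars.endswith (PySem.Chars.strip buf) ("exposing".toList) := by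
      unfold pvCondE; rw [strip_append_ws _ _ hws]
    have hB : pvCondB (buf ++ [c]) = (PySem.Chars.strip buf == ([] : List Char)) := by
      unfold pvCondB; rw [strip_append_ws _ _ hws]
    rcases ih (by simp) d (by rw [hd]; simp; omega) with ⟨ih1, ih2⟩
    rw [pvScan.eq_3 _ _ _ _ c r hx, if_pos hc]
    rw [hsp]
    constructor
    · rcases pe? with _ | v
      · by_cases hEe : PySem.Chars.endswith (PySem.Chars.strip buf) (['e','x','p','o','s','i','n','g']) = true
        · simp [hEe, pvPosE, hE] at ih1 ⊢
          omega
        · simp [hEe, pvPosE, hE] at ih1 ⊢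
          omega
      · simp [pvPosE] at ih1 ⊢
        omega
    · rcases pm? with _ | w
      · by_cases hBe : (PySem.Chars.strip buf == ([] : List Char)) = true
        · simp [hBe, pvPosM, hB] at ih2 ⊢
          omega
        · simp [hBe, pvPosM, hB] at ih2 ⊢
          omega
      · simp [pvPosM] at ih2 ⊢
        omega
  | case4 c r buf start pe? pm? hx hc ih =>
    intro hb d hd
    have hb' : ∀ e ∈ buf ++ [c], e ≠ '\n' ∧ e ≠ '\r' := by
      intro e he
      rcases List.mem_append.mp he with h | h
      · exact hb e h
      · simp at h; subst h; constructor <;> (intro he2; exact hc (by simp [he2]))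
    rcases ih hb' d (by rw [hd]; simp; omega) with ⟨ih1, ih2⟩
    rw [pvScan.eq_3 _ _ _ _ c r hx, if_neg hc]
    have ha : buf ++ [c] ++ r = buf ++ c :: r := by simp
    rw [ha] at ih1 ih2
    exact ⟨ih1, ih2⟩

-- A's filter-of-map = B's fused filterMap
theorem filter_map_eq_filterMap (l : List (List Char)) (p : List Char → Bool) :
    (l.map pvClean).filter p = l.filterMap (fun x => let y := pvClean x; if p y then some y else none) := by
  induction l with
  | nil => rfl
  | cons x r ih =>
    simp only [List.map_cons, List.filter_cons, List.filterMap_cons]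
    by_cases h : p (pvClean x) <;> simp [h, ih]

-- ===== VERDICT (by name: the statement is the Claim_ definition above) =====
theorem replace_exposing_spec : Claim_equal_replace_exposing := by
  intro s ff _
  unfold Spec_replace_exposing replace_exposing replace_exposing_alt
  simp only
  have h := pvScan_spec s.toList [] 0 none none (by simp) s.toList.length (by simp)
  simp only [List.nil_append, Option.getD_none, Nat.zero_add] at h
  rw [h.1, h.2, filter_map_eq_filterMap _ (fun x => (ff.map String.toList).contains x)]
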